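-- pv_equiv track=rewrite | github.com/ZacZhang-H/University-timetable-OR | pso_optimizer.py | find_unused_time_slots
-- ===== SOURCE A (Python) =====
-- def find_unused_time_slots(timetable, weekdays_num, max_lecture_hours):
--
--     all_time_slots = {(day, hour): False for day in range(1, weekdays_num + 1) for hour in range(1, max_lecture_hours + 1)}
--
--
--     for _, _, day, start_hour, end_hour in timetable:
--         for hour in range(start_hour, end_hour):
--             all_time_slots[(day, hour)] = True
--
--
--     unused_time_slots = []
--     for day in range(1, weekdays_num + 1):
--         start = None
--         for hour in range(1, max_lecture_hours + 1):
--             if all_time_slots[(day, hour)] == False: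
--                 if start is None:
--                     start = hour
--             else:
--                 if start is not None:
--                     unused_time_slots.append((day, start, hour))
--                     start = None
--
--         if start is not None:
--             unused_time_slots.append((day, start, max_lecture_hours + 1))
--
--     return unused_time_slots
-- ===== SOURCE B (Python) =====
-- def find_unused_time_slots(timetable, weekdays_num, max_lecture_hours):
--     def busy(day, hour):
--         return any(d == day and s <= hour < e for _, _, d, s, e in timetable)
--
--     unused_time_slots = []
--     for day in range(1, weekdays_num + 1):
--         for hour in range(1, max_lecture_hours + 1):
--             if not busy(day, hour) and (hour == 1 or busy(day, hour - 1)):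
--                 end = next((h for h in range(hour + 1, max_lecture_hours + 1) if busy(day, h)),
--                            max_lecture_hours + 1)
--                 unused_time_slots.append((day, hour, end))
--     return unused_time_slots
-- ===== Notes on version B (the rewrite author's own statement) =====
-- stated objective: simpler
-- what changed: B drops A's pre-built boolean (day,hour) grid dict and stateful run-length scan; it characterises each gap directly: a gap starts at a free hour whose predecessor is busy (or hour 1), and its end is the next busy hour found by a lookahead, with busyness tested straight against the timetable.
import Mathlib
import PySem

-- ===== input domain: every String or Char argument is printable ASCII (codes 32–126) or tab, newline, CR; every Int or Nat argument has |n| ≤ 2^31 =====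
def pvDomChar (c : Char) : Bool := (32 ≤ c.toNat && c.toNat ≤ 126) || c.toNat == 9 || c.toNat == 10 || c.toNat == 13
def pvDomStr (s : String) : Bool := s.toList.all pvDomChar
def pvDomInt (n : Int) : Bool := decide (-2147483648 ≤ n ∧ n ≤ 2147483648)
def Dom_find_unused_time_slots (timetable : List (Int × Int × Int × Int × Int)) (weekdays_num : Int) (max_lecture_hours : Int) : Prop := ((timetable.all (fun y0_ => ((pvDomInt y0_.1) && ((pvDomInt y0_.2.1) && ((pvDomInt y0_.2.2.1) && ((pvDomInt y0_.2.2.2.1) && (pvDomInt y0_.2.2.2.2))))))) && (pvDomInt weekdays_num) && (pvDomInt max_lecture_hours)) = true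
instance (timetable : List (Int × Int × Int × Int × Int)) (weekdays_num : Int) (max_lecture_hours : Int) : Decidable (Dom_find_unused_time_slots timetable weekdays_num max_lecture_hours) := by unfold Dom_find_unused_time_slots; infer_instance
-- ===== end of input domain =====

-- B replaces A's pre-built boolean (day,hour)-grid dict and stateful run-length scan by a direct
-- per-gap characterisation (gap start = free hour with busy/absent predecessor, gap end by lookahead),
-- testing busyness straight against the timetable; objective: simpler (no claim of speed).

-- ===== PORT A =====
def find_unused_time_slots (timetable : List (Int × Int × Int × Int × Int)) (weekdays_num : Int) (max_lecture_hours : Int) : List (Int × Int × Int) :=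
  -- {(day, hour): False for day in range(1, W+1) for hour in range(1, M+1)}
  -- exact port note: the Python dict is ported as a hash map (same insertions in the same
  -- order; only getD/insert are used, so insertion order is unobservable here)
  let all_time_slots : Std.HashMap (Int × Int) Bool :=
    ((PySem.List.pyRange 1 (weekdays_num + 1) 1).flatMap (fun day =>
        (PySem.List.pyRange 1 (max_lecture_hours + 1) 1).map (fun hour => (day, hour)))).foldl
      (fun d k => d.insert k false) (∅ : Std.HashMap (Int × Int) Bool)
  -- for _, _, day, start_hour, end_hour in timetable: for hour in range(start_hour, end_hour): mark True
  let marked : Std.HashMap (Int × Int) Bool :=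
    timetable.foldl (fun d q =>
        (PySem.List.pyRange q.2.2.2.1 q.2.2.2.2 1).foldl
          (fun d hour => d.insert (q.2.2.1, hour) true) d) all_time_slots
  (PySem.List.pyRange 1 (weekdays_num + 1) 1).foldl (fun acc day =>
      let p := (PySem.List.pyRange 1 (max_lecture_hours + 1) 1).foldl
        (fun (st : Option Int × List (Int × Int × Int)) hour =>
          -- exact port note: the Python reads all_time_slots[(day, hour)]; the key is always
          -- present (same ranges as the dict comprehension), so getD is exact here
          if marked.getD (day, hour) false == false then
            match st.1 with
            | none => (some hour, st.2)
            | some _ => st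
          else
            match st.1 with
            | some s => (none, st.2 ++ [(day, s, hour)])
            | none => st) ((none : Option Int), acc)
      match p.1 with
      | some s => p.2 ++ [(day, s, max_lecture_hours + 1)]
      | none => p.2) []

-- ===== PORT B =====
-- busy(day, hour) = any(d == day and s <= hour < e for _, _, d, s, e in timetable)
def pvBusy (timetable : List (Int × Int × Int × Int × Int)) (day hour : Int) : Bool :=
  timetable.any (fun q => q.2.2.1 == day && (decide (q.2.2.2.1 ≤ hour) && decide (hour < q.2.2.2.2)))

def find_unused_time_slots_alt (timetable : List (Int × Int × Int × Int × Int)) (weekdays_num : Int) (max_lecture_hours : Int) : List (Int × Int × Int) :=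
  (PySem.List.pyRange 1 (weekdays_num + 1) 1).foldl (fun acc day =>
      (PySem.List.pyRange 1 (max_lecture_hours + 1) 1).foldl (fun acc hour =>
          if !pvBusy timetable day hour && (hour == 1 || pvBusy timetable day (hour - 1)) then
            -- end = next((h for h in range(hour+1, M+1) if busy(day, h)), M+1)
            acc ++ [(day, hour,
              ((PySem.List.pyRange (hour + 1) (max_lecture_hours + 1) 1).find?
                  (fun h => pvBusy timetable day h)).getD (max_lecture_hours + 1))]
          else acc) acc) []

-- ===== PRECONDITION & SPEC =====
def Spec_find_unused_time_slots (timetable : List (Int × Int × Int × Int × Int)) (weekdays_num : Int) (max_lecture_hours : Int) (out : List (Int × Int × Int)) : Prop := out = find_unused_time_slots_alt timetable weekdays_num max_lecture_hours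
instance (timetable : List (Int × Int × Int × Int × Int)) (weekdays_num : Int) (max_lecture_hours : Int) (out : List (Int × Int × Int)) : Decidable (Spec_find_unused_time_slots timetable weekdays_num max_lecture_hours out) := by unfold Spec_find_unused_time_slots; infer_instance

-- ===== CLAIM (what is proved, stated in full; the proofs are below) =====
def Claim_equal_find_unused_time_slots : Prop := ∀ (timetable : List (Int × Int × Int × Int × Int)) (weekdays_num : Int) (max_lecture_hours : Int), Dom_find_unused_time_slots timetable weekdays_num max_lecture_hours → Spec_find_unused_time_slots timetable weekdays_num max_lecture_hours (find_unused_time_slots timetable weekdays_num max_lecture_hours)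

-- ===== LEMMAS AND PROOFS =====

-- the initial dict (all values False) yields False at every key
theorem pv_getD_init_false (l : List (Int × Int)) (d0 : Std.HashMap (Int × Int) Bool) (k : Int × Int)
    (h : d0.getD k false = false) :
    (l.foldl (fun d k' => d.insert k' false) d0).getD k false = false := by
  induction l generalizing d0 with
  | nil => simpa using h
  | cons a l ih =>
      simp only [List.foldl_cons]
      exact ih _ (by rw [Std.HashMap.getD_insert]; split_ifs <;> simp [h])

-- marking one entry's hour range
theorem pv_getD_mark_range (l : List Int) (dd : Int) (d0 : Std.HashMap (Int × Int) Bool) (kd kh : Int) :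
    ((l.foldl (fun d h => d.insert (dd, h) true) d0)).getD (kd, kh) false
      = (l.contains kh && (dd == kd) || d0.getD (kd, kh) false) := by
  induction l generalizing d0 with
  | nil => simp
  | cons a l ih =>
      simp only [List.foldl_cons]
      rw [ih, Std.HashMap.getD_insert]
      simp only [List.contains_cons]
      by_cases h : (dd, a) = (kd, kh)
      · rw [if_pos (by simp [h])]
        rw [Prod.mk.injEq] at h
        simp [h.1, h.2]
      · rw [if_neg (by simp [h])]
        by_cases hkh : kh = a <;> by_cases hdd : dd = kd
        · exact absurd (by rw [Prod.mk.injEq]; exact ⟨hdd, hkh.symm⟩) h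
        · have hd : (dd == kd) = false := by simp [hdd]
          simp [hkh, hd]
        · have hk : (kh == a) = false := by simp [hkh]
          simp [hk]
        · have hk : (kh == a) = false := by simp [hkh]
          simp [hk]

theorem pv_contains_pyRange (s e kh : Int) :
    (PySem.List.pyRange s e 1).contains kh = (decide (s ≤ kh) && decide (kh < e)) := by
  by_cases h1 : s ≤ kh <;> by_cases h2 : kh < e <;>
    simp [PySem.List.mem_pyRange_one, h1, h2]

theorem pvBusy_cons (q : Int × Int × Int × Int × Int) (tt : List (Int × Int × Int × Int × Int)) (kd kh : Int) :
    pvBusy (q :: tt) kd kh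
      = (q.2.2.1 == kd && (decide (q.2.2.2.1 ≤ kh) && decide (kh < q.2.2.2.2)) || pvBusy tt kd kh) := by
  simp [pvBusy]

-- after marking the whole timetable, the dict value at any key is exactly pvBusy
theorem pv_getD_marked (tt : List (Int × Int × Int × Int × Int))
    (d0 : Std.HashMap (Int × Int) Bool) (kd kh : Int) :
    (tt.foldl (fun d q =>
        (PySem.List.pyRange q.2.2.2.1 q.2.2.2.2 1).foldl
          (fun d hour => d.insert (q.2.2.1, hour) true) d) d0).getD (kd, kh) false
      = (pvBusy tt kd kh || d0.getD (kd, kh) false) := by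
  induction tt generalizing d0 with
  | nil => simp [pvBusy]
  | cons q tt ih =>
      simp only [List.foldl_cons]
      rw [ih, pv_getD_mark_range, pv_contains_pyRange, pvBusy_cons]
      cases hq : (q.2.2.1 == kd) <;> cases h1 : decide (q.2.2.2.1 ≤ kh) <;>
        cases h2 : decide (kh < q.2.2.2.2) <;> cases hb : pvBusy tt kd kh <;>
        cases hg : d0.getD (kd, kh) false <;> simp

-- pointwise-equal step functions give equal foldl results
theorem pv_foldl_ext {α β : Type} (l : List β) (f g : α → β → α) (i : α)
    (h : ∀ a b, f a b = g a b) : l.foldl f i = l.foldl g i := by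
  induction l generalizing i with
  | nil => rfl
  | cons a l ih => simp only [List.foldl_cons, h, ih]

-- interpretation of A's final (state, acc) pair: flush an open run at M+1
def pvPost (dy M : Int) (p : Option Int × List (Int × Int × Int)) : List (Int × Int × Int) :=
  match p.1 with
  | some s => p.2 ++ [(dy, s, M + 1)]
  | none => p.2

-- the per-day scan equivalence: A's stateful run-length scan over hours a..M equals
-- B's boundary-characterisation scan, for any busy predicate
theorem pv_scan_eq (busy : Int → Bool) (dy M : Int) :
    ∀ n a, (M + 1 - a).toNat = n → 1 ≤ a →
      (∀ acc : List (Int × Int × Int), (a = 1 ∨ busy (a - 1) = true) →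
        pvPost dy M ((PySem.List.pyRange a (M + 1) 1).foldl
            (fun (st : Option Int × List (Int × Int × Int)) hour =>
              if busy hour == false then
                match st.1 with
                | none => (some hour, st.2)
                | some _ => st
              else
                match st.1 with
                | some s => (none, st.2 ++ [(dy, s, hour)])
                | none => st) ((none : Option Int), acc))
        = (PySem.List.pyRange a (M + 1) 1).foldl (fun acc hour =>
            if !busy hour && (hour == 1 || busy (hour - 1)) then
              acc ++ [(dy, hour, ((PySem.List.pyRange (hour + 1) (M + 1) 1).find? busy).getD (M + 1))]
            else acc) acc)
      ∧
      (∀ (acc : List (Int × Int × Int)) (s : Int), 1 ≤ s → s < a → busy (a - 1) = false →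
        (PySem.List.pyRange (s + 1) (M + 1) 1).find? busy
          = (PySem.List.pyRange a (M + 1) 1).find? busy →
        pvPost dy M ((PySem.List.pyRange a (M + 1) 1).foldl
            (fun (st : Option Int × List (Int × Int × Int)) hour =>
              if busy hour == false then
                match st.1 with
                | none => (some hour, st.2)
                | some _ => st
              else
                match st.1 with
                | some s => (none, st.2 ++ [(dy, s, hour)])
                | none => st) ((some s : Option Int), acc))
        = (PySem.List.pyRange a (M + 1) 1).foldl (fun acc hour =>
            if !busy hour && (hour == 1 || busy (hour - 1)) then
              acc ++ [(dy, hour, ((PySem.List.pyRange (hour + 1) (M + 1) 1).find? busy).getD (M + 1))]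
            else acc)
            (acc ++ [(dy, s, ((PySem.List.pyRange (s + 1) (M + 1) 1).find? busy).getD (M + 1))])) := by
  intro n
  induction n with
  | zero =>
      intro a h0 _
      have hle : M + 1 ≤ a := by omega
      rw [PySem.List.pyRange_one_eq_nil hle]
      constructor
      · intro acc _; simp [pvPost]
      · intro acc s _ _ _ hfind
        simp only [List.find?_nil] at hfind
        simp [pvPost, hfind]
  | succ n ih =>
      intro a hn ha1
      have hlt : a < M + 1 := by omega
      constructor
      · intro acc hinv
        rw [PySem.List.pyRange_one_cons hlt]
        simp only [List.foldl_cons]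
        by_cases hb : busy a = true
        · -- hour a busy: A stays none, B's guard is false
          have hc : (busy a == false) = false := by simp [hb]
          have hg : (!busy a && (a == 1 || busy (a - 1))) = false := by simp [hb]
          rw [hc, hg]
          exact (ih (a + 1) (by omega) (by omega)).1 acc (Or.inr (by simpa using hb))
        · -- hour a free: A opens a run at a, B emits its gap
          have hb' : busy a = false := by simpa using hb
          have hc : (busy a == false) = true := by simp [hb']
          have hg : (!busy a && (a == 1 || busy (a - 1))) = true := by
            rcases hinv with h | h
            · subst h; simp [hb']
            · simp [hb', h]
          rw [hc, hg]
          exact (ih (a + 1) (by omega) (by omega)).2 acc a (by omega) (by omega)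
            (by simpa using hb') rfl
      · intro acc s hs1 hsa hprev hfind
        rw [PySem.List.pyRange_one_cons hlt]
        rw [PySem.List.pyRange_one_cons hlt] at hfind
        simp only [List.foldl_cons]
        have ha1' : (a == 1) = false := by simp; omega
        have hg : (!busy a && (a == 1 || busy (a - 1))) = false := by
          simp [ha1', hprev]
        by_cases hb : busy a = true
        · -- run ends at a: A appends (dy, s, a); B already appended it
          have hc : (busy a == false) = false := by simp [hb]
          have hfa : (PySem.List.pyRange (s + 1) (M + 1) 1).find? busy = some a := by
            rw [hfind, List.find?_cons_of_pos hb]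
          rw [hc, hg, hfa]
          exact (ih (a + 1) (by omega) (by omega)).1 (acc ++ [(dy, s, a)])
            (Or.inr (by simpa using hb))
        · -- still free: run continues, B does nothing
          have hb' : busy a = false := by simpa using hb
          have hc : (busy a == false) = true := by simp [hb']
          have hfind' : (PySem.List.pyRange (s + 1) (M + 1) 1).find? busy
              = (PySem.List.pyRange (a + 1) (M + 1) 1).find? busy := by
            rw [hfind, List.find?_cons_of_neg (by simp [hb'])]
          rw [hc, hg]
          exact (ih (a + 1) (by omega) (by omega)).2 acc s hs1 (by omega)
            (by simpa using hb') hfind'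

-- ===== VERDICT (by name: the statement is the Claim_ definition above) =====
theorem find_unused_time_slots_spec : Claim_equal_find_unused_time_slots := by
  intro tt W M _
  unfold Spec_find_unused_time_slots find_unused_time_slots find_unused_time_slots_alt
  apply pv_foldl_ext
  intro acc day
  have hkey : ∀ hour, ((tt.foldl (fun d q =>
        (PySem.List.pyRange q.2.2.2.1 q.2.2.2.2 1).foldl
          (fun d hour => d.insert (q.2.2.1, hour) true) d)
      (((PySem.List.pyRange 1 (W + 1) 1).flatMap (fun day =>
          (PySem.List.pyRange 1 (M + 1) 1).map (fun hour => (day, hour)))).foldl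
        (fun d k => d.insert k false) (∅ : Std.HashMap (Int × Int) Bool))).getD (day, hour) false)
      = pvBusy tt day hour := by
    intro hour
    rw [pv_getD_marked, pv_getD_init_false _ _ _ (by simp)]
    simp
  have hstep : (fun (st : Option Int × List (Int × Int × Int)) hour =>
      if (tt.foldl (fun d q =>
            (PySem.List.pyRange q.2.2.2.1 q.2.2.2.2 1).foldl
              (fun d hour => d.insert (q.2.2.1, hour) true) d)
          (((PySem.List.pyRange 1 (W + 1) 1).flatMap (fun day =>
              (PySem.List.pyRange 1 (M + 1) 1).map (fun hour => (day, hour)))).foldl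
            (fun d k => d.insert k false) (∅ : Std.HashMap (Int × Int) Bool))).getD (day, hour) false == false then
        match st.1 with
        | none => (some hour, st.2)
        | some _ => st
      else
        match st.1 with
        | some s => (none, st.2 ++ [(day, s, hour)])
        | none => st)
      = (fun (st : Option Int × List (Int × Int × Int)) hour =>
      if pvBusy tt day hour == false then
        match st.1 with
        | none => (some hour, st.2)
        | some _ => st
      else
        match st.1 with
        | some s => (none, st.2 ++ [(day, s, hour)])
        | none => st) := by
    funext st hour
    rw [hkey]
  rw [hstep]
  exact (pv_scan_eq (pvBusy tt day) day M (M + 1 - 1).toNat 1 rfl le_rfl).1 acc (Or.inl rfl)
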